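-- pv_equiv track=rewrite | github.com/ftorradeflot/timeseries-parser | src/compound/parser.py | is_kwarg
-- ===== SOURCE A (Python) =====
-- def is_kwarg(st):
--
--     ''' Given a string identify if it is a kwarg or not
--
--     .. arguments:
--     - (st) string : string we want to check
--
--     .. returns:
--     - ((id, val_1, val_2):
--         (id) string: arg, kwarg or error
--         (val_1) string: when st is a kwarg, its name, when it is an arg, None, and when
--             it is an error, description of the error
--         (val_2) string: value of the kwarg if kwarg, None if arg or error
--
--     '''
--
--     for ind, elem in enumerate(st):
--         if elem in ['(', ')']:
--             return 'arg', st, None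
--         if elem == '=':
--             if ind == 0:
--                 return 'error', 'Invalid syntax', None
--             elif len(st) < ind + 2:
--                 return 'error', 'Invalid syntax', None
--             else:
--                 return 'kwarg', st[:ind], st[ind + 1:]
--
--     return 'arg', None, None
-- ===== SOURCE B (Python) =====
-- def is_kwarg(st):
--
--     ''' Given a string identify if it is a kwarg or not (find-based re-implementation) '''
--
--     n = len(st)
--
--     def pos(c):
--         i = st.find(c)
--         return i if i >= 0 else n
--
--     p = min(pos('('), pos(')'))
--     e = pos('=')
--     if p == n and e == n:
--         return 'arg', None, None
--     if p < e:
--         return 'arg', st, None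
--     if e == 0 or e == n - 1:
--         return 'error', 'Invalid syntax', None
--     return 'kwarg', st[:e], st[e + 1:]
-- ===== Notes on version B (the rewrite author's own statement) =====
-- stated objective: faster
-- what changed: Replaces the indexed character-by-character scan with three up-front str.find positions (not-found mapped to len(st)) and a comparison of those positions to classify the string.
import Mathlib
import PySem

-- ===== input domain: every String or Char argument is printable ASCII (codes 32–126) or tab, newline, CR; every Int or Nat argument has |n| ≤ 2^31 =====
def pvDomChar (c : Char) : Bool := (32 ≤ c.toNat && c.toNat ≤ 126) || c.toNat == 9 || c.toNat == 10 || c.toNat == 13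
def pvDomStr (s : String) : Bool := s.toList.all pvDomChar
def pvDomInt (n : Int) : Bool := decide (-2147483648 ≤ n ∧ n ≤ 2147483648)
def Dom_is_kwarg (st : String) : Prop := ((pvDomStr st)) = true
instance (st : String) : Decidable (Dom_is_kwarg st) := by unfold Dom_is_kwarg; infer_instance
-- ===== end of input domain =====

-- B replaces A's indexed character scan with three up-front `str.find` positions
-- (not-found mapped to len(st)) compared to classify the string (objective: faster, constant-factor).


-- ===== PORT A =====
-- the `for ind, elem in enumerate(st)` loop, with early returns
def isKwargGo (st : String) : List (Int × Char) → String × Option String × Option String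
  | [] => ("arg", none, none)
  | (ind, elem) :: rest =>
    if elem ∈ (['(', ')'] : List Char) then ("arg", some st, none)
    else if elem = '=' then
      if ind = 0 then ("error", some "Invalid syntax", none)
      else if PySem.Str.len st < ind + 2 then ("error", some "Invalid syntax", none)
      else ("kwarg", some (PySem.Str.slice st none (some ind)),
                     some (PySem.Str.slice st (some (ind + 1)) none))
    else isKwargGo st rest

def is_kwarg (st : String) : String × Option String × Option String :=
  isKwargGo st (PySem.List.enumerate st.toList 0)

-- ===== PORT B =====
def is_kwarg_alt (st : String) : String × Option String × Option String :=
  let n : Int := PySem.Str.len st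
  let pos : String → Int := fun c => let i := PySem.Str.find st c; if 0 ≤ i then i else n
  let p : Int := min (pos "(") (pos ")")
  let e : Int := pos "="
  if p = n ∧ e = n then ("arg", none, none)
  else if p < e then ("arg", some st, none)
  else if e = 0 ∨ e = n - 1 then ("error", some "Invalid syntax", none)
  else ("kwarg", some (PySem.Str.slice st none (some e)),
                 some (PySem.Str.slice st (some (e + 1)) none))

-- ===== PRECONDITION & SPEC =====
def Spec_is_kwarg (st : String) (out : String × Option String × Option String) : Prop := out = is_kwarg_alt st
instance (st : String) (out : String × Option String × Option String) : Decidable (Spec_is_kwarg st out) := by unfold Spec_is_kwarg; infer_instance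

-- ===== CLAIM (what is proved, stated in full; the proofs are below) =====
def Claim_equal_is_kwarg : Prop := ∀ (st : String), Dom_is_kwarg st → Spec_is_kwarg st (is_kwarg st)

-- ===== LEMMAS AND PROOFS =====

-- B's result restated over Nat-valued first-occurrence indices (findIdx = length when absent)
def kwargBform (st : String) : String × Option String × Option String :=
  if min (st.toList.findIdx (· == '(')) (st.toList.findIdx (· == ')')) = st.toList.length
      ∧ st.toList.findIdx (· == '=') = st.toList.length then ("arg", none, none)
  else if min (st.toList.findIdx (· == '(')) (st.toList.findIdx (· == ')')) < st.toList.findIdx (· == '=') then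
    ("arg", some st, none)
  else if st.toList.findIdx (· == '=') = 0
      ∨ ((st.toList.findIdx (· == '=') : Nat) : Int) = (st.toList.length : Int) - 1 then
    ("error", some "Invalid syntax", none)
  else ("kwarg", some (PySem.Str.slice st none (some ((st.toList.findIdx (· == '=') : Nat) : Int))),
                 some (PySem.Str.slice st (some (((st.toList.findIdx (· == '=') : Nat) : Int) + 1)) none))

-- Python's st.find(c) with -1 mapped to len(st) is List.findIdx
lemma find_single_go (c : Char) : ∀ (cs : List Char) (k : Nat),
    PySem.Chars.find.go [c] cs k =
      if cs.findIdx (· == c) < cs.length then ((k + cs.findIdx (· == c) : Nat) : Int) else -1 := by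
  intro cs
  induction cs with
  | nil => intro k; simp [PySem.Chars.find.go]
  | cons x t ih =>
    intro k
    by_cases hx : x = c
    · simp [PySem.Chars.find.go, List.isPrefixOf, hx, List.findIdx_cons]
    · have hxc : (x == c) = false := by simp; exact hx
      have hcx : (c == x) = false := by simp; exact fun h => hx h.symm
      simp only [PySem.Chars.find.go, List.isPrefixOf, hxc, hcx, List.findIdx_cons,
        cond_false, List.length_cons, ih (k + 1), Bool.false_and, if_neg, Bool.false_eq_true,
        not_false_eq_true]
      split_ifs with h1 h2 h2
      · push_cast; omega
      · omega
      · omega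
      · rfl

lemma find_single (c : Char) (cs : List Char) :
    (if 0 ≤ PySem.Chars.find cs [c] then PySem.Chars.find cs [c] else ((cs.length : Int))) =
      ((cs.findIdx (· == c) : Nat) : Int) := by
  have h := find_single_go c cs 0
  simp only [PySem.Chars.find, h]
  split_ifs with h1 h2 h2
  · simp
  · simp at h2
  · omega
  · have := List.findIdx_le_length (p := (· == c)) (xs := cs)
    omega

lemma alt_eq_bform (st : String) : is_kwarg_alt st = kwargBform st := by
  unfold is_kwarg_alt kwargBform
  simp only [PySem.Str.find_eq, PySem.Str.len_eq]
  have hp := find_single '(' st.toList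
  have hq := find_single ')' st.toList
  have he := find_single '=' st.toList
  simp only [show ("(" : String).toList = ['('] from rfl,
    show (")" : String).toList = [')'] from rfl,
    show ("=" : String).toList = ['='] from rfl]
  rw [hp, hq, he, ← Nat.cast_min]
  have h1 : ((min (st.toList.findIdx (· == '(')) (st.toList.findIdx (· == ')')) : Nat) : Int)
      = (st.toList.length : Int) ∧ ((st.toList.findIdx (· == '=') : Nat) : Int) = (st.toList.length : Int)
      ↔ min (st.toList.findIdx (· == '(')) (st.toList.findIdx (· == ')')) = st.toList.length
        ∧ st.toList.findIdx (· == '=') = st.toList.length := by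
    constructor <;> (intro ⟨a, b⟩; exact ⟨by exact_mod_cast a, by exact_mod_cast b⟩)
  simp only [Nat.cast_lt, Nat.cast_eq_zero, h1]

-- no-special prefix pushes findIdx past it
lemma findIdx_skip (q : Char → Bool) (pre suf : List Char) (h : ∀ c ∈ pre, q c = false) :
    (pre ++ suf).findIdx q = pre.length + suf.findIdx q := by
  rw [List.findIdx_append]
  have : pre.findIdx q = pre.length := List.findIdx_eq_length.mpr h
  simp [this]; omega

lemma go_eq_bform (st : String) : ∀ (suf pre : List Char),
    st.toList = pre ++ suf →
    (∀ c ∈ pre, c ≠ '(' ∧ c ≠ ')' ∧ c ≠ '=') →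
    isKwargGo st (PySem.List.enumerate suf (pre.length : Int)) = kwargBform st := by
  intro suf
  induction suf with
  | nil =>
    intro pre hcs hpre
    have hP : st.toList.findIdx (· == '(') = st.toList.length := by
      rw [hcs, List.append_nil]; exact List.findIdx_eq_length.mpr
        (fun c hc => by simp [(hpre c hc).1])
    have hQ : st.toList.findIdx (· == ')') = st.toList.length := by
      rw [hcs, List.append_nil]; exact List.findIdx_eq_length.mpr
        (fun c hc => by simp [(hpre c hc).2.1])
    have hE : st.toList.findIdx (· == '=') = st.toList.length := by
      rw [hcs, List.append_nil]; exact List.findIdx_eq_length.mpr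
        (fun c hc => by simp [(hpre c hc).2.2])
    simp [PySem.List.enumerate, isKwargGo, kwargBform, hP, hQ, hE]
  | cons c rest ih =>
    intro pre hcs hpre
    have hlen : st.toList.length = pre.length + (rest.length + 1) := by
      rw [hcs]; simp
    rw [PySem.List.enumerate_cons]
    by_cases hc1 : c = '(' ∨ c = ')'
    · -- first special char is a parenthesis
      have hE : st.toList.findIdx (· == '=') = pre.length + ((c :: rest).findIdx (· == '=')) := by
        rw [hcs]; exact findIdx_skip _ _ _ (fun x hx => by simp [(hpre x hx).2.2])
      have hEc : (c :: rest).findIdx (· == '=') = rest.findIdx (· == '=') + 1 := by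
        have : (c == '=') = false := by rcases hc1 with h | h <;> simp [h]
        simp [List.findIdx_cons, this]
      have hpmin : min (st.toList.findIdx (· == '(')) (st.toList.findIdx (· == ')')) = pre.length := by
        have hP : st.toList.findIdx (· == '(') = pre.length + ((c :: rest).findIdx (· == '(')) := by
          rw [hcs]; exact findIdx_skip _ _ _ (fun x hx => by simp [(hpre x hx).1])
        have hQ : st.toList.findIdx (· == ')') = pre.length + ((c :: rest).findIdx (· == ')')) := by
          rw [hcs]; exact findIdx_skip _ _ _ (fun x hx => by simp [(hpre x hx).2.1])
        rcases hc1 with h | h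
        · have h0 : (c :: rest).findIdx (· == '(') = 0 := by simp [List.findIdx_cons, h]
          have : pre.length ≤ st.toList.findIdx (· == ')') := by rw [hQ]; omega
          rw [hP, h0]; omega
        · have h0 : (c :: rest).findIdx (· == ')') = 0 := by simp [List.findIdx_cons, h]
          have : pre.length ≤ st.toList.findIdx (· == '(') := by rw [hP]; omega
          rw [hQ, h0]; omega
      have hgo : isKwargGo st (((pre.length : Int), c) :: PySem.List.enumerate rest ((pre.length : Int) + 1))
          = ("arg", some st, none) := by
        rcases hc1 with h | h <;> simp [isKwargGo, h]
      rw [hgo]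
      unfold kwargBform
      rw [if_neg (by rintro ⟨h, -⟩; omega), if_pos (by rw [hpmin, hE, hEc]; omega)]
    · by_cases hc2 : c = '='
      · -- first special char is '='
        have hE : st.toList.findIdx (· == '=') = pre.length := by
          rw [hcs]
          rw [findIdx_skip _ _ _ (fun x hx => by simp [(hpre x hx).2.2])]
          simp [List.findIdx_cons, hc2]
        have hP : pre.length + 1 ≤ st.toList.findIdx (· == '(') := by
          rw [hcs, findIdx_skip _ _ _ (fun x hx => by simp [(hpre x hx).1])]
          have : ((c :: rest).findIdx (· == '(')) ≠ 0 := by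
            simp [List.findIdx_cons, hc2]
          omega
        have hQ : pre.length + 1 ≤ st.toList.findIdx (· == ')') := by
          rw [hcs, findIdx_skip _ _ _ (fun x hx => by simp [(hpre x hx).2.1])]
          have : ((c :: rest).findIdx (· == ')')) ≠ 0 := by
            simp [List.findIdx_cons, hc2]
          omega
        have hgA : isKwargGo st (((pre.length : Int), c) :: PySem.List.enumerate rest ((pre.length : Int) + 1))
            = (if (pre.length : Int) = 0 then ("error", some "Invalid syntax", none)
               else if PySem.Str.len st < (pre.length : Int) + 2 then ("error", some "Invalid syntax", none)
               else ("kwarg", some (PySem.Str.slice st none (some (pre.length : Int))),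
                     some (PySem.Str.slice st (some ((pre.length : Int) + 1)) none))) := by
          simp [isKwargGo, hc2]
        rw [hgA]
        unfold kwargBform
        have hminP : pre.length + 1 ≤ min (st.toList.findIdx (· == '(')) (st.toList.findIdx (· == ')')) :=
          Nat.le_min.mpr ⟨hP, hQ⟩
        rw [PySem.Str.len_eq, hE]
        split_ifs <;>
          first
            | rfl
            | (exfalso; push_cast at *; omega)
      · -- ordinary character: step the scan
        have hstep : isKwargGo st (((pre.length : Int), c) :: PySem.List.enumerate rest ((pre.length : Int) + 1))
            = isKwargGo st (PySem.List.enumerate rest ((pre.length : Int) + 1)) := by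
          have : c ∉ (['(', ')'] : List Char) := by simpa using hc1
          simp [isKwargGo, this, hc2]
        rw [hstep]
        have := ih (pre ++ [c]) (by rw [hcs]; simp)
          (fun x hx => by
            rcases List.mem_append.mp hx with h | h
            · exact hpre x h
            · simp at h; subst h
              exact ⟨fun h => hc1 (Or.inl h), fun h => hc1 (Or.inr h), hc2⟩)
        simpa using this

-- ===== VERDICT (by name: the statement is the Claim_ definition above) =====
theorem is_kwarg_spec : Claim_equal_is_kwarg := by
  intro st _
  unfold Spec_is_kwarg is_kwarg
  rw [alt_eq_bform]
  have := go_eq_bform st st.toList [] (by simp) (by simp)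
  simpa using this
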